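-- pv_equiv track=rewrite | github.com/akshay11career-sys/Anna-result-app | anna_result_app_v14/anna_result_app/backend/app/core/constants.py | is_current_batch_student
-- ===== SOURCE A (Python) =====
-- from typing import Dict, Set, Tuple
--
-- CURRENT_BATCH_RANGES: Dict[str, list] = {
--     "1st Year": [
--         ("910025106", 1, 70),
--     ],
--     "2nd Year": [
--         ("910024106", 1,   70),
--         ("910024106", 301, 320),
--         ("910024106", 701, 720),
--         ("910024106", 501, 520),
--     ],
--     "3rd Year": [
--         ("910023106", 1,   70),
--         ("910023106", 301, 320),
--         ("910023106", 701, 720),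
--         ("910023106", 501, 520),
--     ],
--     "4th Year": [
--         ("910022106", 1,   70),
--         ("910022106", 301, 320),
--         ("910022106", 701, 720),
--         ("910022106", 501, 520),
--     ],
-- }
--
-- def _parse_reg_prefix_and_number(register_number: str) -> Tuple[str, int]:
--     """
--     Split a 12-digit register number into (9-char prefix, 3-digit roll).
--     e.g. '910025106001' → ('910025106', 1)
--          '910024106301' → ('910024106', 301)
--     """
--     if len(register_number) != 12:
--         return ("", 0)
--     prefix = register_number[:9]
--     try:
--         roll = int(register_number[9:])
--     except ValueError:
--         roll = 0
--     return (prefix, roll)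
--
-- def is_current_batch_student(register_number: str) -> bool:
--     """
--     Returns True if the register number falls within any defined current batch range.
--     """
--     prefix, roll = _parse_reg_prefix_and_number(register_number)
--     if not prefix:
--         return False
--     for year_label, ranges in CURRENT_BATCH_RANGES.items():
--         for (range_prefix, start, end) in ranges:
--             if prefix == range_prefix and start <= roll <= end:
--                 return True
--     return False
-- ===== SOURCE B (Python) =====
-- def is_current_batch_student(register_number: str) -> bool:
--     # Closed-form check: prefix decides the year directly, roll validity is plain
--     # interval arithmetic -- no table, no loops.
--     if len(register_number) != 12:
--         return False
--     prefix = register_number[:9]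
--     try:
--         roll = int(register_number[9:])
--     except ValueError:
--         roll = 0
--     if prefix == "910025106":                      # 1st Year: single range
--         return 1 <= roll <= 70
--     if prefix in ("910022106", "910023106", "910024106"):   # 2nd-4th Year: same four ranges
--         return (1 <= roll <= 70 or 301 <= roll <= 320
--                 or 501 <= roll <= 520 or 701 <= roll <= 720)
--     return False
-- ===== Notes on version B (the rewrite author's own statement) =====
-- stated objective: simpler
-- what changed: The data-driven scan over the CURRENT_BATCH_RANGES dict (nested loops over year labels and range triples) is replaced by a closed-form branch: the 9-char prefix is compared against the four batch prefixes directly and roll validity is a plain interval test (one range for 1st Year, the four shared ranges otherwise); the table and the parse helper disappear.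
import Mathlib
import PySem

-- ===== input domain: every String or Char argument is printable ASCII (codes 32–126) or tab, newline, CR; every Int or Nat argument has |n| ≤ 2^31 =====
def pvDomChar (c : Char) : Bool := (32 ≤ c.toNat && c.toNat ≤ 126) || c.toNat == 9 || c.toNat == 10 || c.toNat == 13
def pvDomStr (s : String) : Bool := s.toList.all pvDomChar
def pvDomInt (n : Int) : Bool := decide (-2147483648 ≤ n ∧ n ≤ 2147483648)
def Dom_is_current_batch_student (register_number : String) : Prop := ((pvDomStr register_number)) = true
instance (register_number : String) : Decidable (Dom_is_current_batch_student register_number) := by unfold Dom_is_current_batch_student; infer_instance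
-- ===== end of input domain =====

-- B replaces the data-driven scan over the ranges table by a closed-form branch on the
-- four batch prefixes with plain interval tests (objective: simpler; same observable behaviour).

-- ===== PORT A =====
-- CURRENT_BATCH_RANGES (module constant of A)
def pvBatchRanges : PySem.Dict String (List (String × Int × Int)) :=
  PySem.Dict.ofList [
    ("1st Year", [("910025106", 1, 70)]),
    ("2nd Year", [("910024106", 1, 70), ("910024106", 301, 320), ("910024106", 701, 720), ("910024106", 501, 520)]),
    ("3rd Year", [("910023106", 1, 70), ("910023106", 301, 320), ("910023106", 701, 720), ("910023106", 501, 520)]),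
    ("4th Year", [("910022106", 1, 70), ("910022106", 301, 320), ("910022106", 701, 720), ("910022106", 501, 520)])]

-- _parse_reg_prefix_and_number (A's helper; int() → ofStr?, ValueError → 0)
def pvParse (register_number : String) : String × Int :=
  if PySem.Str.len register_number ≠ 12 then ("", 0)
  else (PySem.Str.slice register_number none (some 9),
        (PySem.Int.ofStr? (PySem.Str.slice register_number (some 9) none)).getD 0)

def is_current_batch_student (register_number : String) : Bool :=
  let p := pvParse register_number
  if p.1 == "" then false
  else
    -- 'for … in items: for … in ranges: if …: return True' / 'return False' = nested any
    pvBatchRanges.items.any (fun yr =>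
      yr.2.any (fun t => p.1 == t.1 && decide (t.2.1 ≤ p.2) && decide (p.2 ≤ t.2.2)))

-- ===== PORT B =====
-- closed-form: branch on the prefix, test the roll against literal intervals
def is_current_batch_student_alt (register_number : String) : Bool :=
  if PySem.Str.len register_number ≠ 12 then false
  else
    let pfx := PySem.Str.slice register_number none (some 9)
    let roll := (PySem.Int.ofStr? (PySem.Str.slice register_number (some 9) none)).getD 0
    if pfx == "910025106" then decide (1 ≤ roll ∧ roll ≤ 70)
    else if pfx == "910022106" || pfx == "910023106" || pfx == "910024106" then
      decide (1 ≤ roll ∧ roll ≤ 70) || decide (301 ≤ roll ∧ roll ≤ 320)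
        || decide (501 ≤ roll ∧ roll ≤ 520) || decide (701 ≤ roll ∧ roll ≤ 720)
    else false

-- ===== PRECONDITION & SPEC =====
def Spec_is_current_batch_student (register_number : String) (out : Bool) : Prop := out = is_current_batch_student_alt register_number
instance (register_number : String) (out : Bool) : Decidable (Spec_is_current_batch_student register_number out) := by unfold Spec_is_current_batch_student; infer_instance

-- ===== CLAIM =====
def Claim_equal_is_current_batch_student : Prop := ∀ (register_number : String), Dom_is_current_batch_student register_number → Spec_is_current_batch_student register_number (is_current_batch_student register_number)

-- ===== LEMMAS AND PROOFS =====
lemma pvItems_eval : pvBatchRanges.items = [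
    ("1st Year", [("910025106", 1, 70)]),
    ("2nd Year", [("910024106", 1, 70), ("910024106", 301, 320), ("910024106", 701, 720), ("910024106", 501, 520)]),
    ("3rd Year", [("910023106", 1, 70), ("910023106", 301, 320), ("910023106", 701, 720), ("910023106", 501, 520)]),
    ("4th Year", [("910022106", 1, 70), ("910022106", 301, 320), ("910022106", 701, 720), ("910022106", 501, 520)])] := by decide

-- A's guarded table scan equals B's closed-form branch, for any prefix p and roll r
lemma pvBranch_eq (p : String) (r : Int) :
    (if p == "" then false else
      pvBatchRanges.items.any (fun yr =>
        yr.2.any (fun t => p == t.1 && decide (t.2.1 ≤ r) && decide (r ≤ t.2.2))))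
  = (if p == "910025106" then decide (1 ≤ r ∧ r ≤ 70)
     else if p == "910022106" || p == "910023106" || p == "910024106" then
       decide (1 ≤ r ∧ r ≤ 70) || decide (301 ≤ r ∧ r ≤ 320)
         || decide (501 ≤ r ∧ r ≤ 520) || decide (701 ≤ r ∧ r ≤ 720)
     else false) := by
  by_cases h1 : p = "910025106"
  · subst h1; rw [pvItems_eval, Bool.eq_iff_iff]; simp
  by_cases h2 : p = "910024106"
  · subst h2; rw [pvItems_eval, Bool.eq_iff_iff]; simp; tauto
  by_cases h3 : p = "910023106"
  · subst h3; rw [pvItems_eval, Bool.eq_iff_iff]; simp; tauto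
  by_cases h4 : p = "910022106"
  · subst h4; rw [pvItems_eval, Bool.eq_iff_iff]; simp; tauto
  · rw [pvItems_eval, Bool.eq_iff_iff]; simp [h1, h2, h3, h4]

-- ===== VERDICT =====
theorem is_current_batch_student_spec : Claim_equal_is_current_batch_student := by
  intro rn _
  unfold Spec_is_current_batch_student
  have ha : is_current_batch_student rn = (if (pvParse rn).1 == "" then false else
      pvBatchRanges.items.any (fun yr =>
        yr.2.any (fun t => (pvParse rn).1 == t.1 && decide (t.2.1 ≤ (pvParse rn).2) && decide ((pvParse rn).2 ≤ t.2.2)))) := rfl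
  by_cases hl : (rn.length : Int) = 12
  · have hp : pvParse rn = (PySem.Str.slice rn none (some 9),
        (PySem.Int.ofStr? (PySem.Str.slice rn (some 9) none)).getD 0) := by
      simp [pvParse, PySem.Str.len, hl]
    have hb : is_current_batch_student_alt rn =
        (if PySem.Str.slice rn none (some 9) == "910025106" then decide (1 ≤ (pvParse rn).2 ∧ (pvParse rn).2 ≤ 70)
         else if PySem.Str.slice rn none (some 9) == "910022106" || PySem.Str.slice rn none (some 9) == "910023106" || PySem.Str.slice rn none (some 9) == "910024106" then
           decide (1 ≤ (pvParse rn).2 ∧ (pvParse rn).2 ≤ 70) || decide (301 ≤ (pvParse rn).2 ∧ (pvParse rn).2 ≤ 320)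
             || decide (501 ≤ (pvParse rn).2 ∧ (pvParse rn).2 ≤ 520) || decide (701 ≤ (pvParse rn).2 ∧ (pvParse rn).2 ≤ 720)
         else false) := by
      unfold is_current_batch_student_alt
      rw [if_neg (by simp [PySem.Str.len, hl] : ¬ PySem.Str.len rn ≠ 12), hp]
    rw [ha, hb, hp]
    exact pvBranch_eq _ _
  · have hp : pvParse rn = ("", 0) := by simp [pvParse, PySem.Str.len, hl]
    have hb : is_current_batch_student_alt rn = false := by
      unfold is_current_batch_student_alt
      rw [if_pos (by simp [PySem.Str.len, hl] : PySem.Str.len rn ≠ 12)]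
    rw [ha, hb, hp]
    simp
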